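-- pv_equiv track=rewrite | github.com/jaychempan/Glohydro-1 | Runoff alteration and flood risk/flood_analysis.py | extract_risk_level
-- ===== SOURCE A (Python) =====
-- RISK_MAPPING = {
--     'high_risk': 'High Risk',
--     'high risk': 'High Risk',
--     'high': 'High Risk',
--     'medium_risk': 'Medium Risk',
--     'medium risk': 'Medium Risk',
--     'medium': 'Medium Risk',
--     'low_risk': 'Low Risk',
--     'low risk': 'Low Risk',
--     'low': 'Low Risk'
-- }
--
-- def extract_risk_level(properties):
--     """Extract risk level from feature properties"""
--     if properties is None or not hasattr(properties, 'get'):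
--         return 'Low Risk'
--
--     # Check common risk level fields
--     risk_fields = ['name', 'risk', 'risk_level', 'level', 'type', 'category']
--
--     for field in risk_fields:
--         try:
--             if field in properties and properties[field] is not None:
--                 field_value = str(properties[field]).strip().lower()
--
--                 # Match risk level using mapping
--                 for key, risk_level in RISK_MAPPING.items():
--                     if key in field_value:
--                         return risk_level
--         except:
--             continue
--
--     return 'Low Risk'
-- ===== SOURCE B (Python) =====
-- FIELDS = ('name', 'risk', 'risk_level', 'level', 'type', 'category')
-- TIERS = ('high', 'medium', 'low')
-- LABELS = ('High Risk', 'Medium Risk', 'Low Risk')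
--
--
-- def _hits(properties):
--     """All (field_priority, tier_priority) matches, collected in one sweep."""
--     hits = []
--     for fi, field in enumerate(FIELDS):
--         raw = properties.get(field)
--         if raw is None:
--             continue
--         v = str(raw).strip().lower()
--         for ti, word in enumerate(TIERS):
--             if word in v:
--                 hits.append((fi, ti))
--     return hits
--
--
-- def extract_risk_level(properties):
--     """Extract risk level from feature properties"""
--     if properties is None or not hasattr(properties, 'get'):
--         return 'Low Risk'
--     hits = _hits(properties)
--     if not hits:
--         return 'Low Risk'
--     return LABELS[min(hits)[1]]
-- ===== Notes on version B (the rewrite author's own statement) =====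
-- stated objective: alternative
-- what changed: Instead of A's early-return nested scan over a nine-entry substring mapping, B collects ALL (field_priority, tier_priority) matches against the three base words in one sweep and returns the label indexed by the lexicographic minimum (valid because every mapping key contains its base word and both orderings are priority orders).
import Mathlib
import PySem

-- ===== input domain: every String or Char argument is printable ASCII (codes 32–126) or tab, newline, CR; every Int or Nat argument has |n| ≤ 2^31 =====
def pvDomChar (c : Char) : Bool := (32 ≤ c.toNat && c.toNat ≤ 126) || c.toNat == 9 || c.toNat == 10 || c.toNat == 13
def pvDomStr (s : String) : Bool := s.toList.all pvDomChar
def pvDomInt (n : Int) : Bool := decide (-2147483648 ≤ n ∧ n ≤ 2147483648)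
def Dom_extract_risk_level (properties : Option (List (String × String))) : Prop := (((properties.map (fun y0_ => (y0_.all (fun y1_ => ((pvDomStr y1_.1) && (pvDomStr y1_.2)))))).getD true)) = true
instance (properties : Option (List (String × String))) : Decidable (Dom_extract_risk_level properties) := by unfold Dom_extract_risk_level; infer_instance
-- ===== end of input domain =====

-- B replaces A's early-return nested scan over the nine-entry mapping by a staged data-flow:
-- collect ALL (field_priority, tier_priority) matches in one sweep, then take the
-- lexicographic minimum and index the label table; objective: alternative decomposition.

-- ===== PORT A =====
def riskMapping : List (String × String) :=
  [("high_risk", "High Risk"), ("high risk", "High Risk"), ("high", "High Risk"),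
   ("medium_risk", "Medium Risk"), ("medium risk", "Medium Risk"), ("medium", "Medium Risk"),
   ("low_risk", "Low Risk"), ("low risk", "Low Risk"), ("low", "Low Risk")]

-- inner loop of A: first mapping key that is a substring of fv
def scanMapping : List (String × String) → String → Option String
  | [], _ => none
  | (k, r) :: rest, fv => if PySem.Str.isIn k fv then some r else scanMapping rest fv

-- outer loop of A over the risk fields
def goA (d : PySem.Dict String String) : List String → String
  | [] => "Low Risk"
  | f :: rest =>
    if d.contains f then
      match d.get? f with
      | some v =>
        let fv := PySem.Str.lower (PySem.Str.strip v)
        match scanMapping riskMapping fv with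
        | some r => r
        | none => goA d rest
      | none => goA d rest
    else goA d rest

def extract_risk_level (properties : Option (List (String × String))) : String :=
  match properties with
  | none => "Low Risk"
  | some d => goA (PySem.Dict.mk d) ["name", "risk", "risk_level", "level", "type", "category"]

-- ===== PORT B =====
def fieldsB : List String := ["name", "risk", "risk_level", "level", "type", "category"]
def tiersB : List String := ["high", "medium", "low"]
def labelsB : List String := ["High Risk", "Medium Risk", "Low Risk"]

-- inner comprehension of _hits: all tier indices whose word occurs in v, paired with fi
def tierHits (fi : Nat) (v : String) : Nat → List String → List (Nat × Nat)
  | _, [] => []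
  | ti, w :: rest =>
    if PySem.Str.isIn w v then (fi, ti) :: tierHits fi v (ti + 1) rest
    else tierHits fi v (ti + 1) rest

-- outer loop of _hits over the enumerated fields
def hitsB (d : PySem.Dict String String) : Nat → List String → List (Nat × Nat)
  | _, [] => []
  | fi, f :: rest =>
    match d.get? f with
    | none => hitsB d (fi + 1) rest
    | some raw =>
      tierHits fi (PySem.Str.lower (PySem.Str.strip raw)) 0 tiersB ++ hitsB d (fi + 1) rest

-- Python tuple '<' on (Nat × Nat), lexicographic
def lexLt (p q : Nat × Nat) : Bool := p.1 < q.1 || (p.1 == q.1 && p.2 < q.2)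

-- min(hits) as Python computes it (first element, then strict-less replaces)
def minHit : List (Nat × Nat) → Option (Nat × Nat)
  | [] => none
  | h :: t => some (t.foldl (fun acc p => if lexLt p acc then p else acc) h)

def extract_risk_level_alt (properties : Option (List (String × String))) : String :=
  match properties with
  | none => "Low Risk"
  | some l =>
    match minHit (hitsB (PySem.Dict.mk l) 0 fieldsB) with
    | none => "Low Risk"
    | some m => (PySem.List.pyGet? labelsB (m.2 : Int)).getD ""  -- LABELS[ti]; ti < 3 always, so the getD default is never used

-- ===== PRECONDITION & SPEC =====
def Spec_extract_risk_level (properties : Option (List (String × String))) (out : String) : Prop := out = extract_risk_level_alt properties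
instance (properties : Option (List (String × String))) (out : String) : Decidable (Spec_extract_risk_level properties out) := by unfold Spec_extract_risk_level; infer_instance

-- ===== CLAIM (what is proved, stated in full; the proofs are below) =====
def Claim_equal_extract_risk_level : Prop := ∀ (properties : Option (List (String × String))), Dom_extract_risk_level properties → Spec_extract_risk_level properties (extract_risk_level properties)

-- ===== LEMMAS AND PROOFS =====

-- substring containment is antitone in the pattern
theorem isIn_mono_false (a b v : String) (h : a.toList <:+: b.toList)
    (ha : PySem.Str.isIn a v = false) : PySem.Str.isIn b v = false := by
  rw [PySem.Str.isIn_eq, PySem.Chars.isIn_eq_false_iff] at ha ⊢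
  exact fun hb => ha (h.trans hb)

-- label of the head of the hit list (what goA computes field by field)
def labelOf : Option (Nat × Nat) → String
  | none => "Low Risk"
  | some m => (PySem.List.pyGet? labelsB (m.2 : Int)).getD ""

-- elements of tierHits: first component fi, second component ≥ start index, strictly sorted
theorem tierHits_mem (fi : Nat) (v : String) :
    ∀ (t : Nat) (ws : List String) (p : Nat × Nat), p ∈ tierHits fi v t ws → p.1 = fi ∧ t ≤ p.2 := by
  intro t ws
  induction ws generalizing t with
  | nil => intro p hp; simp [tierHits] at hp
  | cons w rest ih =>
    intro p hp
    rw [tierHits] at hp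
    split at hp
    · rcases List.mem_cons.mp hp with h | h
      · subst h; exact ⟨rfl, le_refl _⟩
      · have := ih (t + 1) p h; exact ⟨this.1, by omega⟩
    · have := ih (t + 1) p hp; exact ⟨this.1, by omega⟩

theorem tierHits_pairwise (fi : Nat) (v : String) :
    ∀ (t : Nat) (ws : List String), List.Pairwise (fun p q => lexLt p q = true) (tierHits fi v t ws) := by
  intro t ws
  induction ws generalizing t with
  | nil => simp [tierHits]
  | cons w rest ih =>
    rw [tierHits]
    split
    · refine List.Pairwise.cons ?_ (ih (t + 1))
      intro q hq
      have := tierHits_mem fi v (t + 1) rest q hq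
      simp [lexLt, this.1]; omega
    · exact ih (t + 1)

theorem hitsB_mem (d : PySem.Dict String String) :
    ∀ (n : Nat) (fs : List String) (p : Nat × Nat), p ∈ hitsB d n fs → n ≤ p.1 := by
  intro n fs
  induction fs generalizing n with
  | nil => intro p hp; simp [hitsB] at hp
  | cons f rest ih =>
    intro p hp
    rw [hitsB] at hp
    split at hp
    · have := ih (n + 1) p hp; omega
    · rcases List.mem_append.mp hp with h | h
      · exact (tierHits_mem n _ 0 tiersB p h).1 ▸ le_refl _
      · have := ih (n + 1) p h; omega

theorem hitsB_pairwise (d : PySem.Dict String String) :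
    ∀ (n : Nat) (fs : List String), List.Pairwise (fun p q => lexLt p q = true) (hitsB d n fs) := by
  intro n fs
  induction fs generalizing n with
  | nil => simp [hitsB]
  | cons f rest ih =>
    rw [hitsB]
    split
    · exact ih (n + 1)
    · rw [List.pairwise_append]
      refine ⟨tierHits_pairwise _ _ 0 tiersB, ih (n + 1), ?_⟩
      intro a ha b hb
      have h1 := (tierHits_mem _ _ 0 tiersB a ha).1
      have h2 := hitsB_mem d (n + 1) rest b hb
      simp [lexLt]; omega

-- the fold of min over a list every element of which is ≥ the accumulator stays put
theorem foldl_min_fixed (h : Nat × Nat) :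
    ∀ (t : List (Nat × Nat)), (∀ p ∈ t, lexLt p h = false) →
      t.foldl (fun acc p => if lexLt p acc then p else acc) h = h := by
  intro t
  induction t with
  | nil => intro _; rfl
  | cons x xs ih =>
    intro hall
    have hx : lexLt x h = false := hall x (List.mem_cons_self)
    simp only [List.foldl_cons, hx]
    exact ih (fun p hp => hall p (List.mem_cons_of_mem _ hp))

-- on a strictly lex-sorted list, Python's min is the head
theorem minHit_sorted (l : List (Nat × Nat))
    (hs : List.Pairwise (fun p q => lexLt p q = true) l) : minHit l = l.head? := by
  cases l with
  | nil => rfl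
  | cons h t =>
    rw [minHit, List.head?_cons]
    congr 1
    apply foldl_min_fixed
    intro p hp
    have := (List.pairwise_cons.mp hs).1 p hp
    simp [lexLt] at this ⊢
    omega

-- A's nine-key scan agrees (as a label) with the head of B's tier-hit list
theorem scan_eq_tierHead (v : String) :
    scanMapping riskMapping v = ((tierHits 0 v 0 tiersB).head?).map (fun m => (PySem.List.pyGet? labelsB (m.2 : Int)).getD "") := by
  by_cases hH : PySem.Str.isIn "high" v = true
  · simp only [PySem.Str.isIn_eq] at hH
    simp at hH
    simp [scanMapping, riskMapping, tierHits, tiersB, labelsB, PySem.List.pyGet?, PySem.List.pyIdx?, hH]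
  · rw [Bool.not_eq_true] at hH
    have h1 := isIn_mono_false "high" "high_risk" v (by decide) hH
    have h2 := isIn_mono_false "high" "high risk" v (by decide) hH
    by_cases hM : PySem.Str.isIn "medium" v = true
    · simp only [PySem.Str.isIn_eq] at hH h1 h2 hM
      simp at hH h1 h2 hM
      simp [scanMapping, riskMapping, tierHits, tiersB, labelsB, PySem.List.pyGet?, PySem.List.pyIdx?, hH, h1, h2, hM]
    · rw [Bool.not_eq_true] at hM
      have h3 := isIn_mono_false "medium" "medium_risk" v (by decide) hM
      have h4 := isIn_mono_false "medium" "medium risk" v (by decide) hM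
      by_cases hL : PySem.Str.isIn "low" v = true
      · simp only [PySem.Str.isIn_eq] at hH h1 h2 hM h3 h4 hL
        simp at hH h1 h2 hM h3 h4 hL
        simp [scanMapping, riskMapping, tierHits, tiersB, labelsB, PySem.List.pyGet?, PySem.List.pyIdx?, hH, h1, h2, hM, h3, h4, hL]
      · rw [Bool.not_eq_true] at hL
        have h5 := isIn_mono_false "low" "low_risk" v (by decide) hL
        have h6 := isIn_mono_false "low" "low risk" v (by decide) hL
        simp only [PySem.Str.isIn_eq] at hH h1 h2 hM h3 h4 hL h5 h6
        simp at hH h1 h2 hM h3 h4 hL h5 h6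
        simp [scanMapping, riskMapping, tierHits, tiersB, hH, h1, h2, hM, h3, h4, hL, h5, h6]

-- the hit list of tierHits does not depend on fi in its head's label, and an empty
-- tier-hit list at one fi is empty at another; we use fi-genericity directly:
theorem tierHits_shift (v : String) (fi : Nat) :
    ∀ (t : Nat) (ws : List String), tierHits fi v t ws = (tierHits 0 v t ws).map (fun p => (fi, p.2)) := by
  intro t ws
  induction ws generalizing t with
  | nil => simp [tierHits]
  | cons w rest ih =>
    rw [tierHits, tierHits]
    split
    · simp [ih (t + 1)]
    · exact ih (t + 1)

-- field-by-field: A's loop equals the label of the head of B's hit list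
theorem goA_eq_head (d : PySem.Dict String String) :
    ∀ (n : Nat) (fs : List String), goA d fs = labelOf ((hitsB d n fs).head?) := by
  intro n fs
  induction fs generalizing n with
  | nil => rfl
  | cons f rest ih =>
    rw [goA, hitsB, PySem.Dict.contains_eq_isSome_get?]
    cases hg : d.get? f with
    | none => simpa using ih (n + 1)
    | some v =>
      simp only [Option.isSome_some, if_true]
      rw [tierHits_shift _ n]
      cases hh : (tierHits 0 (PySem.Str.lower (PySem.Str.strip v)) 0 tiersB).head? with
      | none =>
        have he : tierHits 0 (PySem.Str.lower (PySem.Str.strip v)) 0 tiersB = [] :=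
          List.head?_eq_none_iff.mp hh
        have hs : scanMapping riskMapping (PySem.Str.lower (PySem.Str.strip v)) = none := by
          rw [scan_eq_tierHead, hh]; rfl
        rw [hs, he]
        simpa using ih (n + 1)
      | some m =>
        obtain ⟨x, t, hxt⟩ : ∃ x t, tierHits 0 (PySem.Str.lower (PySem.Str.strip v)) 0 tiersB = x :: t := by
          cases hc : tierHits 0 (PySem.Str.lower (PySem.Str.strip v)) 0 tiersB with
          | nil => rw [hc] at hh; simp at hh
          | cons a b => exact ⟨a, b, rfl⟩
        rw [hxt] at hh
        simp only [List.head?_cons, Option.some.injEq] at hh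
        subst hh
        have hs := scan_eq_tierHead (PySem.Str.lower (PySem.Str.strip v))
        rw [hxt] at hs
        simp only [List.head?_cons, Option.map_some] at hs
        rw [hs, hxt]
        simp [labelOf]

-- ===== VERDICT (by name: the statement is the Claim_ definition above) =====
theorem extract_risk_level_spec : Claim_equal_extract_risk_level := by
  intro properties _
  unfold Spec_extract_risk_level
  cases properties with
  | none => rfl
  | some l =>
    simp only [extract_risk_level, extract_risk_level_alt]
    rw [minHit_sorted _ (hitsB_pairwise _ 0 fieldsB)]
    have h := goA_eq_head (PySem.Dict.mk l) 0 fieldsB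
    rw [show (["name", "risk", "risk_level", "level", "type", "category"] : List String) = fieldsB from rfl, h]
    cases (hitsB (PySem.Dict.mk l) 0 fieldsB).head? with
    | none => rfl
    | some m => rfl
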